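-- pv_equiv track=rewrite | github.com/NguyenHoangTrieu/DA2_esp | config_app/config_protocol.py | parse_config_dump
-- ===== SOURCE A (Python) =====
-- from typing import Dict, Optional, Tuple, List
--
-- def parse_config_dump(lines: list) -> Dict[str, Dict[str, str]]:
--     """Parse CFSC response"""
--     config_data = {
--         'GATEWAY_INFO': {},
--         'WAN_CONFIG': {},
--         'LAN_CONFIG': {}
--     }
--
--     current_section = None
--     for line in lines:
--         line = line.strip()
--         if not line:
--             continue
--         if line.startswith('[') and line.endswith(']'):
--             current_section = line[1:-1]
--             continue
--         if '=' in line and current_section: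
--             key, value = line.split('=', 1)
--             key = key.strip()
--             value = value.strip()
--             if current_section in config_data:
--                 config_data[current_section][key] = value
--
--     return config_data
-- ===== SOURCE B (Python) =====
-- def parse_config_dump(lines: list):
--     """Parse CFSC response: bucket lines by section first, then fill the three fixed sections."""
--     buckets = {}
--     current = None
--     for raw in lines:
--         line = raw.strip()
--         if not line:
--             continue
--         if line.startswith('[') and line.endswith(']'):
--             current = line[1:-1]
--         elif current is not None:
--             buckets.setdefault(current, []).append(line)
--     result = {}
--     for name in ('GATEWAY_INFO', 'WAN_CONFIG', 'LAN_CONFIG'):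
--         section = {}
--         for line in buckets.get(name, []):
--             if '=' in line:
--                 key, value = line.split('=', 1)
--                 section[key.strip()] = value.strip()
--         result[name] = section
--     return result
-- ===== Notes on version B (the rewrite author's own statement) =====
-- stated objective: alternative
-- what changed: Single interleaved loop that mutates the nested result dict per key line is replaced by a two-pass decomposition: first bucket stripped lines under their current section header, then build the fixed three-section result by folding each section's bucketed lines.
import Mathlib
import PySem

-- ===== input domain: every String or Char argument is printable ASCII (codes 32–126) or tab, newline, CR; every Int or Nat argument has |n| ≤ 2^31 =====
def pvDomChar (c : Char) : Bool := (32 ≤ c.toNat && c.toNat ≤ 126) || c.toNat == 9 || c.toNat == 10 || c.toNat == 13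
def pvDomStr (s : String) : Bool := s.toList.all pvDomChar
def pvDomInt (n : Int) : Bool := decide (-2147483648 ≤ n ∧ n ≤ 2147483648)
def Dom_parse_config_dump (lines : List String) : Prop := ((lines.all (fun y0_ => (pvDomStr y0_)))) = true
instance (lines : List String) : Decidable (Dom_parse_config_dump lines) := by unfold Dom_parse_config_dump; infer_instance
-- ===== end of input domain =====

-- B replaces A's single interleaved loop by a two-pass decomposition (bucket lines by section, then fill
-- the three fixed sections); same cost, alternative structure. Equivalence of return values is proved.

-- ===== PORT A =====
-- 'key, value = line.split("=", 1); config[sec][key.strip()] = value.strip()' — the statement both Pythons contain verbatim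
def pcdSetKV (d : PySem.Dict String String) (l : String) : PySem.Dict String String :=
  match PySem.Str.splitMax? l "=" 1 with
  | some (k :: v :: _) => d.insert (PySem.Str.strip k) (PySem.Str.strip v)
  | _ => d

def pcdLoopA (lines : List String) (cd : PySem.Dict String (PySem.Dict String String))
    (cs : Option String) : PySem.Dict String (PySem.Dict String String) :=
  match lines with
  | [] => cd
  | line :: rest =>
    let l := PySem.Str.strip line
    if l = "" then pcdLoopA rest cd cs
    else if PySem.Str.startswith l "[" && PySem.Str.endswith l "]" then
      pcdLoopA rest cd (some (PySem.Str.slice l (some 1) (some (-1))))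
    else
      match cs with
      | none => pcdLoopA rest cd cs
      | some c =>
        if PySem.Str.isIn "=" l && !(c == "") then
          if cd.contains c then
            pcdLoopA rest (cd.modify c PySem.Dict.empty (fun d => pcdSetKV d l)) cs
          else pcdLoopA rest cd cs
        else pcdLoopA rest cd cs

def parse_config_dump (lines : List String) : List (String × List (String × String)) :=
  (pcdLoopA lines
      (PySem.Dict.ofList [("GATEWAY_INFO", PySem.Dict.empty), ("WAN_CONFIG", PySem.Dict.empty),
                          ("LAN_CONFIG", PySem.Dict.empty)]) none).items.map
    (fun p => (p.1, p.2.items))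

-- ===== PORT B =====
-- first pass: bucket each stripped, nonblank, non-header line under the current section name
def pcdBucketB (lines : List String) (bk : PySem.Dict String (List String))
    (cur : Option String) : PySem.Dict String (List String) :=
  match lines with
  | [] => bk
  | line :: rest =>
    let l := PySem.Str.strip line
    if l = "" then pcdBucketB rest bk cur
    else if PySem.Str.startswith l "[" && PySem.Str.endswith l "]" then
      pcdBucketB rest bk (some (PySem.Str.slice l (some 1) (some (-1))))
    else
      match cur with
      | none => pcdBucketB rest bk cur
      | some c => pcdBucketB rest (bk.insert c (bk.getD c [] ++ [l])) cur

-- second pass, per section: fold the bucketed lines into a key→value dict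
def pcdFill (ls : List String) : PySem.Dict String String :=
  ls.foldl (fun d l => if PySem.Str.isIn "=" l then pcdSetKV d l else d) PySem.Dict.empty

def parse_config_dump_alt (lines : List String) : List (String × List (String × String)) :=
  let b := pcdBucketB lines PySem.Dict.empty none
  let result := ["GATEWAY_INFO", "WAN_CONFIG", "LAN_CONFIG"].foldl
      (fun r n => r.insert n (pcdFill (b.getD n []))) PySem.Dict.empty
  result.items.map (fun p => (p.1, p.2.items))

-- ===== PRECONDITION & SPEC =====
def Spec_parse_config_dump (lines : List String) (out : List (String × List (String × String))) : Prop := out = parse_config_dump_alt lines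
instance (lines : List String) (out : List (String × List (String × String))) : Decidable (Spec_parse_config_dump lines out) := by unfold Spec_parse_config_dump; infer_instance

-- ===== CLAIM (what is proved, stated in full; the proofs are below) =====
def Claim_equal_parse_config_dump : Prop := ∀ (lines : List String), Dom_parse_config_dump lines → Spec_parse_config_dump lines (parse_config_dump lines)

-- ===== LEMMAS AND PROOFS =====

-- pcdFill processes an appended line at the end
lemma pcdFill_append (xs : List String) (l : String) :
    pcdFill (xs ++ [l]) = if PySem.Str.isIn "=" l then pcdSetKV (pcdFill xs) l else pcdFill xs := by
  simp [pcdFill, List.foldl_append]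

-- Dict.modify at each of the three literal keys of A's result dict, computed
lemma pcd_modify_G (g w l : PySem.Dict String String) (f : PySem.Dict String String → PySem.Dict String String) :
    (PySem.Dict.mk [("GATEWAY_INFO", g), ("WAN_CONFIG", w), ("LAN_CONFIG", l)]).modify "GATEWAY_INFO" PySem.Dict.empty f
      = PySem.Dict.mk [("GATEWAY_INFO", f g), ("WAN_CONFIG", w), ("LAN_CONFIG", l)] := rfl
lemma pcd_modify_W (g w l : PySem.Dict String String) (f : PySem.Dict String String → PySem.Dict String String) :
    (PySem.Dict.mk [("GATEWAY_INFO", g), ("WAN_CONFIG", w), ("LAN_CONFIG", l)]).modify "WAN_CONFIG" PySem.Dict.empty f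
      = PySem.Dict.mk [("GATEWAY_INFO", g), ("WAN_CONFIG", f w), ("LAN_CONFIG", l)] := rfl
lemma pcd_modify_L (g w l : PySem.Dict String String) (f : PySem.Dict String String → PySem.Dict String String) :
    (PySem.Dict.mk [("GATEWAY_INFO", g), ("WAN_CONFIG", w), ("LAN_CONFIG", l)]).modify "LAN_CONFIG" PySem.Dict.empty f
      = PySem.Dict.mk [("GATEWAY_INFO", g), ("WAN_CONFIG", w), ("LAN_CONFIG", f l)] := rfl

-- the central invariant: A's loop on a state whose three sections are the fills of the current
-- buckets computes the fills of B's final buckets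
lemma pcd_main (rest : List String) :
    ∀ (bk : PySem.Dict String (List String)) (cs : Option String),
    pcdLoopA rest
        (PySem.Dict.mk [("GATEWAY_INFO", pcdFill (bk.getD "GATEWAY_INFO" [])),
                        ("WAN_CONFIG", pcdFill (bk.getD "WAN_CONFIG" [])),
                        ("LAN_CONFIG", pcdFill (bk.getD "LAN_CONFIG" []))]) cs
    = PySem.Dict.mk
        [("GATEWAY_INFO", pcdFill ((pcdBucketB rest bk cs).getD "GATEWAY_INFO" [])),
         ("WAN_CONFIG", pcdFill ((pcdBucketB rest bk cs).getD "WAN_CONFIG" [])),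
         ("LAN_CONFIG", pcdFill ((pcdBucketB rest bk cs).getD "LAN_CONFIG" []))] := by
  induction rest with
  | nil => intro bk cs; rfl
  | cons line rest ih =>
    intro bk cs
    simp only [pcdLoopA, pcdBucketB]
    by_cases h0 : PySem.Str.strip line = ""
    · simp only [h0]; exact ih bk cs
    · simp only [if_neg h0]
      by_cases h1 : (PySem.Str.startswith (PySem.Str.strip line) "[" &&
                     PySem.Str.endswith (PySem.Str.strip line) "]") = true
      · simp only [h1, if_true]; exact ih bk _
      · simp only [h1, if_false, Bool.false_eq_true]
        cases cs with
        | none => exact ih bk none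
        | some c =>
          by_cases hG : c = "GATEWAY_INFO"
          · subst hG
            have hbk := ih (bk.insert "GATEWAY_INFO" (bk.getD "GATEWAY_INFO" [] ++ [PySem.Str.strip line])) (some "GATEWAY_INFO")
            have e2 : pcdFill ((bk.insert "GATEWAY_INFO" (bk.getD "GATEWAY_INFO" [] ++ [PySem.Str.strip line])).getD "WAN_CONFIG" []) =
                pcdFill (bk.getD "WAN_CONFIG" []) := by
              rw [PySem.Dict.getD_insert_of_ne _ _ _ (by decide)]
            have e3 : pcdFill ((bk.insert "GATEWAY_INFO" (bk.getD "GATEWAY_INFO" [] ++ [PySem.Str.strip line])).getD "LAN_CONFIG" []) =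
                pcdFill (bk.getD "LAN_CONFIG" []) := by
              rw [PySem.Dict.getD_insert_of_ne _ _ _ (by decide)]
            rw [e2, e3] at hbk
            by_cases he : PySem.Str.isIn "=" (PySem.Str.strip line) = true
            · have e1 : pcdFill ((bk.insert "GATEWAY_INFO" (bk.getD "GATEWAY_INFO" [] ++ [PySem.Str.strip line])).getD "GATEWAY_INFO" []) =
                  pcdSetKV (pcdFill (bk.getD "GATEWAY_INFO" [])) (PySem.Str.strip line) := by
                rw [PySem.Dict.getD_insert_self, pcdFill_append, if_pos he]
              rw [e1] at hbk
              simp only [he, Bool.true_and, show (!("GATEWAY_INFO" == "")) = true from rfl, if_true,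
                show (PySem.Dict.mk [("GATEWAY_INFO", pcdFill (bk.getD "GATEWAY_INFO" [])),
                        ("WAN_CONFIG", pcdFill (bk.getD "WAN_CONFIG" [])),
                        ("LAN_CONFIG", pcdFill (bk.getD "LAN_CONFIG" []))]).contains "GATEWAY_INFO" = true from rfl,
                pcd_modify_G]
              exact hbk
            · have e1 : pcdFill ((bk.insert "GATEWAY_INFO" (bk.getD "GATEWAY_INFO" [] ++ [PySem.Str.strip line])).getD "GATEWAY_INFO" []) =
                  pcdFill (bk.getD "GATEWAY_INFO" []) := by
                rw [PySem.Dict.getD_insert_self, pcdFill_append, if_neg he]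
              rw [e1] at hbk
              simp only [he, Bool.false_and, if_false, Bool.false_eq_true]
              exact hbk
          by_cases hW : c = "WAN_CONFIG"
          · subst hW
            have hbk := ih (bk.insert "WAN_CONFIG" (bk.getD "WAN_CONFIG" [] ++ [PySem.Str.strip line])) (some "WAN_CONFIG")
            have e2 : pcdFill ((bk.insert "WAN_CONFIG" (bk.getD "WAN_CONFIG" [] ++ [PySem.Str.strip line])).getD "GATEWAY_INFO" []) =
                pcdFill (bk.getD "GATEWAY_INFO" []) := by
              rw [PySem.Dict.getD_insert_of_ne _ _ _ (by decide)]
            have e3 : pcdFill ((bk.insert "WAN_CONFIG" (bk.getD "WAN_CONFIG" [] ++ [PySem.Str.strip line])).getD "LAN_CONFIG" []) =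
                pcdFill (bk.getD "LAN_CONFIG" []) := by
              rw [PySem.Dict.getD_insert_of_ne _ _ _ (by decide)]
            rw [e2, e3] at hbk
            by_cases he : PySem.Str.isIn "=" (PySem.Str.strip line) = true
            · have e1 : pcdFill ((bk.insert "WAN_CONFIG" (bk.getD "WAN_CONFIG" [] ++ [PySem.Str.strip line])).getD "WAN_CONFIG" []) =
                  pcdSetKV (pcdFill (bk.getD "WAN_CONFIG" [])) (PySem.Str.strip line) := by
                rw [PySem.Dict.getD_insert_self, pcdFill_append, if_pos he]
              rw [e1] at hbk
              simp only [he, Bool.true_and, show (!("WAN_CONFIG" == "")) = true from rfl, if_true,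
                show (PySem.Dict.mk [("GATEWAY_INFO", pcdFill (bk.getD "GATEWAY_INFO" [])),
                        ("WAN_CONFIG", pcdFill (bk.getD "WAN_CONFIG" [])),
                        ("LAN_CONFIG", pcdFill (bk.getD "LAN_CONFIG" []))]).contains "WAN_CONFIG" = true from rfl,
                pcd_modify_W]
              exact hbk
            · have e1 : pcdFill ((bk.insert "WAN_CONFIG" (bk.getD "WAN_CONFIG" [] ++ [PySem.Str.strip line])).getD "WAN_CONFIG" []) =
                  pcdFill (bk.getD "WAN_CONFIG" []) := by
                rw [PySem.Dict.getD_insert_self, pcdFill_append, if_neg he]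
              rw [e1] at hbk
              simp only [he, Bool.false_and, if_false, Bool.false_eq_true]
              exact hbk
          by_cases hL : c = "LAN_CONFIG"
          · subst hL
            have hbk := ih (bk.insert "LAN_CONFIG" (bk.getD "LAN_CONFIG" [] ++ [PySem.Str.strip line])) (some "LAN_CONFIG")
            have e2 : pcdFill ((bk.insert "LAN_CONFIG" (bk.getD "LAN_CONFIG" [] ++ [PySem.Str.strip line])).getD "GATEWAY_INFO" []) =
                pcdFill (bk.getD "GATEWAY_INFO" []) := by
              rw [PySem.Dict.getD_insert_of_ne _ _ _ (by decide)]
            have e3 : pcdFill ((bk.insert "LAN_CONFIG" (bk.getD "LAN_CONFIG" [] ++ [PySem.Str.strip line])).getD "WAN_CONFIG" []) =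
                pcdFill (bk.getD "WAN_CONFIG" []) := by
              rw [PySem.Dict.getD_insert_of_ne _ _ _ (by decide)]
            rw [e2, e3] at hbk
            by_cases he : PySem.Str.isIn "=" (PySem.Str.strip line) = true
            · have e1 : pcdFill ((bk.insert "LAN_CONFIG" (bk.getD "LAN_CONFIG" [] ++ [PySem.Str.strip line])).getD "LAN_CONFIG" []) =
                  pcdSetKV (pcdFill (bk.getD "LAN_CONFIG" [])) (PySem.Str.strip line) := by
                rw [PySem.Dict.getD_insert_self, pcdFill_append, if_pos he]
              rw [e1] at hbk
              simp only [he, Bool.true_and, show (!("LAN_CONFIG" == "")) = true from rfl, if_true,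
                show (PySem.Dict.mk [("GATEWAY_INFO", pcdFill (bk.getD "GATEWAY_INFO" [])),
                        ("WAN_CONFIG", pcdFill (bk.getD "WAN_CONFIG" [])),
                        ("LAN_CONFIG", pcdFill (bk.getD "LAN_CONFIG" []))]).contains "LAN_CONFIG" = true from rfl,
                pcd_modify_L]
              exact hbk
            · have e1 : pcdFill ((bk.insert "LAN_CONFIG" (bk.getD "LAN_CONFIG" [] ++ [PySem.Str.strip line])).getD "LAN_CONFIG" []) =
                  pcdFill (bk.getD "LAN_CONFIG" []) := by
                rw [PySem.Dict.getD_insert_self, pcdFill_append, if_neg he]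
              rw [e1] at hbk
              simp only [he, Bool.false_and, if_false, Bool.false_eq_true]
              exact hbk
          -- c is not one of the three fixed section names: A leaves its dict unchanged,
          -- and B's appended bucket for c is not consulted for any of the three names
          have hbk := ih (bk.insert c (bk.getD c [] ++ [PySem.Str.strip line])) (some c)
          have e : ∀ n, n ≠ c →
              pcdFill ((bk.insert c (bk.getD c [] ++ [PySem.Str.strip line])).getD n []) =
                pcdFill (bk.getD n []) := by
            intro n hn
            rw [PySem.Dict.getD_insert_of_ne _ _ _ hn]
          have hcont : (PySem.Dict.mk [("GATEWAY_INFO", pcdFill (bk.getD "GATEWAY_INFO" [])),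
                          ("WAN_CONFIG", pcdFill (bk.getD "WAN_CONFIG" [])),
                          ("LAN_CONFIG", pcdFill (bk.getD "LAN_CONFIG" []))]).contains c = false := by
            simp [PySem.Dict.contains_mk, Ne.symm hG, Ne.symm hW, Ne.symm hL]
          rw [e "GATEWAY_INFO" (Ne.symm hG), e "WAN_CONFIG" (Ne.symm hW),
              e "LAN_CONFIG" (Ne.symm hL)] at hbk
          dsimp only
          split_ifs with h2 h3
          · exact absurd h3 (by simp [hcont])
          · exact hbk
          · exact hbk

-- ===== VERDICT (by name: the statement is the Claim_ definition above) =====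
theorem parse_config_dump_spec : Claim_equal_parse_config_dump := by
  intro lines _
  show parse_config_dump lines = parse_config_dump_alt lines
  unfold parse_config_dump parse_config_dump_alt
  rw [show PySem.Dict.ofList [("GATEWAY_INFO", (PySem.Dict.empty : PySem.Dict String String)),
        ("WAN_CONFIG", PySem.Dict.empty), ("LAN_CONFIG", PySem.Dict.empty)]
      = PySem.Dict.mk [("GATEWAY_INFO", pcdFill ((PySem.Dict.empty : PySem.Dict String (List String)).getD "GATEWAY_INFO" [])),
          ("WAN_CONFIG", pcdFill (PySem.Dict.empty.getD "WAN_CONFIG" [])),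
          ("LAN_CONFIG", pcdFill (PySem.Dict.empty.getD "LAN_CONFIG" []))] from rfl,
    pcd_main lines PySem.Dict.empty none]
  rfl
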